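-- pv_equiv track=rewrite | github.com/hgarrereyn/bn-wasm | parser.py | decode_LEB128
-- ===== SOURCE A (Python) =====
-- def decode_LEB128(dat, start):
--     '''
--     Decodes a variable length integer according to the LEB128 format
--
--     Returns (value, end)
--     '''
--     val = 0
--
--     i = start
--     while dat[i] & 0x80:
--         val += (dat[i] & 0x7f) << ((i - start) * 7)
--         i += 1
--     val += (dat[i] & 0x7f) << ((i - start) * 7)
--     i += 1
--
--     return (val, i)
-- ===== SOURCE B (Python) =====
-- def decode_LEB128(dat, start):
--     '''
--     Decodes a variable length integer according to the LEB128 format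
--
--     Returns (value, end)
--     '''
--     # Pass 1: locate the terminating byte (continuation bit clear).
--     end = start
--     while dat[end] & 0x80:
--         end += 1
--     # Pass 2: Horner evaluation back-to-front over dat[start..end].
--     val = 0
--     i = end
--     while i >= start:
--         val = (val << 7) | (dat[i] & 0x7f)
--         i -= 1
--     return (val, end + 1)
-- ===== Notes on version B (the rewrite author's own statement) =====
-- stated objective: alternative
-- what changed: Replaces A's single forward accumulation pass with per-byte (i-start)*7 shifts by two staged passes: a scan that only locates the terminating byte, then a back-to-front Horner fold (val = (val << 7) | chunk) over the bytes of the encoding.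
import Mathlib
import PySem

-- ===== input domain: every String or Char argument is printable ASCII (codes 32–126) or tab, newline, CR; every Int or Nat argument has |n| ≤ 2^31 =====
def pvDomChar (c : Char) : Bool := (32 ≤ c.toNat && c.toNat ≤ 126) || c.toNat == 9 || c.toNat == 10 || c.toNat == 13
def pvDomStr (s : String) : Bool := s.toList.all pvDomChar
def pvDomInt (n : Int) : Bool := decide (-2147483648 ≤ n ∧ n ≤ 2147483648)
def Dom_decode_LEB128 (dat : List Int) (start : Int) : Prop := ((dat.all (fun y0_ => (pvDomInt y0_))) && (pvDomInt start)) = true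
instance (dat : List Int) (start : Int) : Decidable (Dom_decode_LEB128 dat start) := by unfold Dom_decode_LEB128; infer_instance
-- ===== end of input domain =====

-- B decodes in two staged passes — a scan that only locates the terminating byte, then a
-- back-to-front Horner fold (val = (val << 7) | chunk) over the bytes — instead of A's single
-- forward pass with per-byte (i - start) * 7 shifts (objective: alternative; no speed claim).

-- ===== PORT A =====
-- Fuel makes the while-loop total; 2*|dat|+1 exceeds the number of byte reads of any
-- terminating run (incl. negative-start wraparound), and Pre_ excludes the IndexError runs.
-- The shift exponent (i - start) * 7 is ≥ 0 on every reached state (i starts at start and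
-- only increments), so `.toNat` is exact there.
def decode_LEB128_loopA (dat : List Int) (start : Int) (val i : Int) : Nat → Int × Int
  | 0 => (val, i)
  | fuel + 1 =>
    match PySem.List.pyGet? dat i with
    | none => (val, i)  -- dat[i] raises IndexError: excluded by Pre_
    | some b =>
      if PySem.Int.band b 0x80 ≠ 0 then
        decode_LEB128_loopA dat start
          (val + (PySem.Int.band b 0x7f <<< ((i - start) * 7).toNat)) (i + 1) fuel
      else
        -- the peeled statements after the while loop (dat[i] re-reads the same element)
        (val + (PySem.Int.band b 0x7f <<< ((i - start) * 7).toNat), i + 1)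

def decode_LEB128 (dat : List Int) (start : Int) : Int × Int :=
  decode_LEB128_loopA dat start 0 start (2 * dat.length + 1)

-- ===== PORT B =====
-- Pass 1 of Source B: `end = start; while dat[end] & 0x80: end += 1` — returns the index of the
-- terminating byte; none = IndexError (excluded by Pre_) or fuel exhaustion (never reached:
-- the same fuel bound as port A covers every terminating run).
def decode_LEB128_findEnd (dat : List Int) (e : Int) : Nat → Option Int
  | 0 => none
  | fuel + 1 =>
    match PySem.List.pyGet? dat e with
    | none => none  -- dat[end] raises IndexError: excluded by Pre_
    | some b =>
      if PySem.Int.band b 0x80 ≠ 0 then decode_LEB128_findEnd dat (e + 1) fuel else some e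

-- Pass 2 of Source B: `i = end; while i >= start: val = (val << 7) | (dat[i] & 0x7f); i -= 1`.
def decode_LEB128_horner (dat : List Int) (val j stop : Int) : Nat → Int
  | 0 => val
  | fuel + 1 =>
    if j ≥ stop then
      match PySem.List.pyGet? dat j with
      | none => val  -- dat[i] raises IndexError: excluded by Pre_
      | some b =>
        decode_LEB128_horner dat (PySem.Int.bor (val <<< (7 : Nat)) (PySem.Int.band b 0x7f)) (j - 1) stop fuel
    else val

def decode_LEB128_alt (dat : List Int) (start : Int) : Int × Int :=
  match decode_LEB128_findEnd dat start (2 * dat.length + 1) with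
  | none => (0, start)  -- unreachable under Pre_ (the Python raises IndexError here)
  | some e => (decode_LEB128_horner dat 0 e start (2 * dat.length + 1), e + 1)

-- ===== PRECONDITION & SPEC =====
-- Pre_: exactly the inputs on which the Python A returns — scanning bytes from `start`
-- (Python indexing, so a negative start wraps), some readable byte at offset m has its
-- continuation bit clear before an index goes out of range (IndexError otherwise).
def Pre_decode_LEB128 (dat : List Int) (start : Int) : Prop :=
  ∃ m : Nat, m ≤ 2 * dat.length ∧
    (∀ k : Nat, k ≤ m → (PySem.List.pyGet? dat (start + k)).isSome = true) ∧
    PySem.Int.band ((PySem.List.pyGet? dat (start + m)).getD 0) 0x80 = 0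
instance (dat : List Int) (start : Int) : Decidable (Pre_decode_LEB128 dat start) := by
  unfold Pre_decode_LEB128; infer_instance

def pvWitness_decode_LEB128 : List Int × Int := ([0xe5, 0x8e, 0x26, 0x7f], 0)

def Spec_decode_LEB128 (dat : List Int) (start : Int) (out : Int × Int) : Prop := out = decode_LEB128_alt dat start
instance (dat : List Int) (start : Int) (out : Int × Int) : Decidable (Spec_decode_LEB128 dat start out) := by unfold Spec_decode_LEB128; infer_instance

-- ===== CLAIM (what is proved, stated in full; the proofs are below) =====
def Claim_equal_decode_LEB128 : Prop := ∀ (dat : List Int) (start : Int), Dom_decode_LEB128 dat start → Pre_decode_LEB128 dat start → Spec_decode_LEB128 dat start (decode_LEB128 dat start)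

-- ===== LEMMAS AND PROOFS =====

-- reference value of the encoding dat[i..i+m], chunks low to high
def pvRefVal (dat : List Int) : Int → Nat → Int
  | i, 0 => PySem.Int.band ((PySem.List.pyGet? dat i).getD 0) 0x7f
  | i, m + 1 => PySem.Int.band ((PySem.List.pyGet? dat i).getD 0) 0x7f + pvRefVal dat (i + 1) m * 128

-- OR of disjoint chunks is addition (Nat level).
lemma pv_lor_eq_add (s : Nat) : ∀ a b : Nat, a < 2 ^ s → a ||| (b * 2 ^ s) = a + b * 2 ^ s := by
  induction s with
  | zero => intro a b h; interval_cases a; simp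
  | succ s ih =>
    intro a b h
    have hp : 2 ^ (s + 1) = 2 * 2 ^ s := by ring
    have h2 : a / 2 < 2 ^ s := by omega
    have key := ih (a / 2) b h2
    have ha : a = Nat.bit (a % 2 = 1) (a / 2) := by
      rcases Nat.decEq (a % 2) 1 with hd | hd <;> simp [Nat.bit, hd] <;> omega
    have hb : b * 2 ^ (s + 1) = Nat.bit false (b * 2 ^ s) := by
      simp [Nat.bit]; ring
    rw [ha, hb, Nat.lor_bit]
    rcases Nat.decEq (a % 2) 1 with hd | hd <;> simp [Nat.bit, hd] <;> omega

lemma pv_band_0x7f_bounds (b : Int) : 0 ≤ PySem.Int.band b 0x7f ∧ PySem.Int.band b 0x7f ≤ 0x7f := by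
  simp only [PySem.Int.band]
  split_ifs with h1 h2 h2
  · have := Nat.and_le_right (n := Int.toNat b) (m := Int.toNat 0x7f)
    constructor <;> [positivity; exact_mod_cast Nat.le_trans this (by norm_num)]
  · omega
  · have := Nat.sub_le (Int.toNat 0x7f) (Int.toNat 0x7f &&& Int.toNat (-b - 1))
    constructor <;> [positivity; exact_mod_cast Nat.le_trans this (by norm_num)]
  · omega

lemma pv_shift_cast (c : Int) (s : Nat) (hc : 0 ≤ c) : c <<< s = ((c.toNat * 2 ^ s : Nat) : Int) := by
  obtain ⟨n, rfl⟩ := Int.eq_ofNat_of_zero_le hc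
  show Int.ofNat n <<< s = _
  simp [Int.shiftLeft_eq, Int.ofNat_eq_natCast]

lemma pv_shift_eq_mul (c : Int) (s : Nat) (hc : 0 ≤ c) : c <<< s = c * 2 ^ s := by
  rw [pv_shift_cast c s hc]; push_cast; rw [Int.toNat_of_nonneg hc]

-- B's Horner step: OR-ing a 7-bit chunk into the freed low bits is addition.
lemma pv_horner_bor (val c : Int) (h0 : 0 ≤ val) (hc0 : 0 ≤ c) (hc : c < 128) :
    PySem.Int.bor (val <<< (7 : Nat)) c = val * 128 + c := by
  rw [pv_shift_cast val 7 h0]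
  obtain ⟨cn, rfl⟩ := Int.eq_ofNat_of_zero_le hc0
  rw [show ((cn : Int)) = ((cn : Nat) : Int) from rfl, PySem.Int.bor_natCast]
  have hcn : cn < 2 ^ 7 := by exact_mod_cast hc
  rw [Nat.lor_comm, pv_lor_eq_add 7 cn (Int.toNat val) hcn]
  push_cast
  rw [Int.toNat_of_nonneg h0]; ring

-- splitting the reference value at the high end
lemma pv_refVal_split (dat : List Int) :
    ∀ (m : Nat) (i : Int), pvRefVal dat i (m + 1)
      = pvRefVal dat i m
        + PySem.Int.band ((PySem.List.pyGet? dat (i + (m + 1 : Nat))).getD 0) 0x7f * 2 ^ ((m + 1) * 7) := by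
  intro m
  induction m with
  | zero =>
    intro i
    simp only [pvRefVal]
    push_cast
    norm_num
  | succ m ih =>
    intro i
    show pvRefVal dat i (m + 2) = _
    simp only [pvRefVal] at *
    rw [ih (i + 1)]
    have : i + 1 + ((m + 1 : Nat) : Int) = i + ((m + 2 : Nat) : Int) := by push_cast; ring
    rw [this]
    ring

-- A's loop computes val + refVal * 2^(7*(i-start)) and stops after the terminating byte.
lemma pv_loopA_eq (dat : List Int) (start : Int) :
    ∀ (m : Nat) (i val : Int) (fuel : Nat), start ≤ i → m < fuel →
      (∀ k : Nat, k ≤ m → (PySem.List.pyGet? dat (i + k)).isSome = true) →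
      (∀ k : Nat, k < m → PySem.Int.band ((PySem.List.pyGet? dat (i + k)).getD 0) 0x80 ≠ 0) →
      PySem.Int.band ((PySem.List.pyGet? dat (i + m)).getD 0) 0x80 = 0 →
      decode_LEB128_loopA dat start val i fuel
        = (val + pvRefVal dat i m * 2 ^ ((i - start).toNat * 7), i + m + 1) := by
  intro m
  induction m with
  | zero =>
    intro i val fuel hi hf hsome hmid hlast
    obtain ⟨fuel, rfl⟩ : ∃ f, fuel = f + 1 := ⟨fuel - 1, by omega⟩
    have h0 := hsome 0 (le_refl _)
    simp only [Nat.cast_zero, add_zero] at h0 hlast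
    obtain ⟨b, hb⟩ := Option.isSome_iff_exists.mp h0
    simp only [decode_LEB128_loopA, hb]
    rw [hb] at hlast
    simp only [Option.getD_some] at hlast
    rw [if_neg (by simpa using hlast)]
    have hs : ((i - start) * 7).toNat = (i - start).toNat * 7 := by omega
    rw [hs, pv_shift_eq_mul _ _ (pv_band_0x7f_bounds b).1]
    simp [pvRefVal, hb]
  | succ m ih =>
    intro i val fuel hi hf hsome hmid hlast
    obtain ⟨fuel, rfl⟩ : ∃ f, fuel = f + 1 := ⟨fuel - 1, by omega⟩
    have h0 := hsome 0 (by omega)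
    simp only [Nat.cast_zero, add_zero] at h0
    obtain ⟨b, hb⟩ := Option.isSome_iff_exists.mp h0
    have hcont := hmid 0 (by omega)
    simp only [Nat.cast_zero, add_zero, hb, Option.getD_some] at hcont
    simp only [decode_LEB128_loopA, hb]
    rw [if_pos (by simpa using hcont)]
    have hrec := ih (i + 1) (val + PySem.Int.band b 0x7f <<< ((i - start) * 7).toNat) fuel
      (by omega) (by omega)
      (fun k hk => by
        have := hsome (k + 1) (by omega)
        have hidx : i + ((k + 1 : Nat) : Int) = i + 1 + (k : Int) := by push_cast; ring
        rwa [hidx] at this)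
      (fun k hk => by
        have := hmid (k + 1) (by omega)
        have hidx : i + ((k + 1 : Nat) : Int) = i + 1 + (k : Int) := by push_cast; ring
        rwa [hidx] at this)
      (by
        have hidx : i + ((m + 1 : Nat) : Int) = i + 1 + (m : Int) := by push_cast; ring
        rwa [hidx] at hlast)
    rw [hrec]
    have hs : ((i - start) * 7).toNat = (i - start).toNat * 7 := by omega
    have hs1 : (i + 1 - start).toNat * 7 = (i - start).toNat * 7 + 7 := by omega
    rw [hs, hs1, pv_shift_eq_mul _ _ (pv_band_0x7f_bounds b).1, Prod.mk.injEq]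
    refine ⟨?_, ?_⟩
    · simp only [pvRefVal, hb, Option.getD_some]
      rw [show (2:Int) ^ ((i - start).toNat * 7 + 7) = 2 ^ ((i - start).toNat * 7) * 128 by ring]
      ring
    · push_cast; ring

-- B's first pass finds the index of the terminating byte.
lemma pv_findEnd_eq (dat : List Int) :
    ∀ (m : Nat) (i : Int) (fuel : Nat), m < fuel →
      (∀ k : Nat, k ≤ m → (PySem.List.pyGet? dat (i + k)).isSome = true) →
      (∀ k : Nat, k < m → PySem.Int.band ((PySem.List.pyGet? dat (i + k)).getD 0) 0x80 ≠ 0) →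
      PySem.Int.band ((PySem.List.pyGet? dat (i + m)).getD 0) 0x80 = 0 →
      decode_LEB128_findEnd dat i fuel = some (i + m) := by
  intro m
  induction m with
  | zero =>
    intro i fuel hf hsome hmid hlast
    obtain ⟨fuel, rfl⟩ : ∃ f, fuel = f + 1 := ⟨fuel - 1, by omega⟩
    have h0 := hsome 0 (le_refl _)
    simp only [Nat.cast_zero, add_zero] at h0 hlast
    obtain ⟨b, hb⟩ := Option.isSome_iff_exists.mp h0
    rw [hb] at hlast
    simp only [Option.getD_some] at hlast
    simp [decode_LEB128_findEnd, hb, hlast]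
  | succ m ih =>
    intro i fuel hf hsome hmid hlast
    obtain ⟨fuel, rfl⟩ : ∃ f, fuel = f + 1 := ⟨fuel - 1, by omega⟩
    have h0 := hsome 0 (by omega)
    simp only [Nat.cast_zero, add_zero] at h0
    obtain ⟨b, hb⟩ := Option.isSome_iff_exists.mp h0
    have hcont := hmid 0 (by omega)
    simp only [Nat.cast_zero, add_zero, hb, Option.getD_some] at hcont
    simp only [decode_LEB128_findEnd, hb]
    rw [if_pos (by simpa using hcont)]
    have hrec := ih (i + 1) fuel (by omega)
      (fun k hk => by
        have := hsome (k + 1) (by omega)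
        have hidx : i + ((k + 1 : Nat) : Int) = i + 1 + (k : Int) := by push_cast; ring
        rwa [hidx] at this)
      (fun k hk => by
        have := hmid (k + 1) (by omega)
        have hidx : i + ((k + 1 : Nat) : Int) = i + 1 + (k : Int) := by push_cast; ring
        rwa [hidx] at this)
      (by
        have hidx : i + ((m + 1 : Nat) : Int) = i + 1 + (m : Int) := by push_cast; ring
        rwa [hidx] at hlast)
    rw [hrec]
    congr 1
    push_cast; ring

lemma pv_horner_stop (dat : List Int) (val j i : Int) (fuel : Nat) (h : ¬ j ≥ i) :
    decode_LEB128_horner dat val j i fuel = val := by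
  cases fuel <;> simp [decode_LEB128_horner, h]

-- B's second pass is Horner evaluation of the chunks high-to-low.
lemma pv_horner_eq (dat : List Int) (i : Int) :
    ∀ (m : Nat) (val : Int) (fuel : Nat), 0 ≤ val → m < fuel →
      (∀ k : Nat, k ≤ m → (PySem.List.pyGet? dat (i + k)).isSome = true) →
      decode_LEB128_horner dat val (i + m) i fuel
        = val * 2 ^ ((m + 1) * 7) + pvRefVal dat i m := by
  intro m
  induction m with
  | zero =>
    intro val fuel h0 hf hsome
    obtain ⟨fuel, rfl⟩ : ∃ f, fuel = f + 1 := ⟨fuel - 1, by omega⟩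
    have hs0 := hsome 0 (le_refl _)
    simp only [Nat.cast_zero, add_zero] at hs0 ⊢
    obtain ⟨b, hb⟩ := Option.isSome_iff_exists.mp hs0
    simp only [decode_LEB128_horner, hb, ge_iff_le, le_refl, if_true]
    rw [pv_horner_stop dat _ _ _ _ (by omega)]
    obtain ⟨hc0, hc7⟩ := pv_band_0x7f_bounds b
    rw [pv_horner_bor val _ h0 hc0 (by omega)]
    simp [pvRefVal, hb]
  | succ m ih =>
    intro val fuel h0 hf hsome
    obtain ⟨fuel, rfl⟩ : ∃ f, fuel = f + 1 := ⟨fuel - 1, by omega⟩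
    have hsm := hsome (m + 1) (le_refl _)
    obtain ⟨b, hb⟩ := Option.isSome_iff_exists.mp hsm
    have hge : i + ((m + 1 : Nat) : Int) ≥ i := by push_cast; omega
    simp only [decode_LEB128_horner, hb]
    rw [if_pos hge]
    obtain ⟨hc0, hc7⟩ := pv_band_0x7f_bounds b
    rw [pv_horner_bor val _ h0 hc0 (by omega)]
    have hidx : i + ((m + 1 : Nat) : Int) - 1 = i + (m : Nat) := by push_cast; ring
    rw [hidx]
    have hrec := ih (val * 128 + PySem.Int.band b 0x7f) fuel
      (by positivity) (by omega)
      (fun k hk => hsome k (by omega))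
    rw [hrec, pv_refVal_split dat m i, hb]
    simp only [Option.getD_some]
    rw [show ((m + 1 + 1) * 7) = (m + 1) * 7 + 7 by ring,
        show (2:Int) ^ ((m + 1) * 7 + 7) = 2 ^ ((m + 1) * 7) * 128 by ring]
    ring

-- ===== VERDICT (by name: the statement is the Claim_ definition above) =====
theorem decode_LEB128_spec : Claim_equal_decode_LEB128 := by
  intro dat start _ hpre
  obtain ⟨m, hm, hsome, hclear⟩ := hpre
  -- take the FIRST offset with the continuation bit clear: that is where both loops stop
  have hex : ∃ n : Nat, (∀ k : Nat, k ≤ n → (PySem.List.pyGet? dat (start + k)).isSome = true) ∧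
      PySem.Int.band ((PySem.List.pyGet? dat (start + n)).getD 0) 0x80 = 0 := ⟨m, hsome, hclear⟩
  set m0 := Nat.find hex with hm0
  obtain ⟨hsome0, hclear0⟩ := Nat.find_spec hex
  have hle : m0 ≤ m := Nat.find_le ⟨hsome, hclear⟩
  have hmid0 : ∀ k : Nat, k < m0 →
      PySem.Int.band ((PySem.List.pyGet? dat (start + k)).getD 0) 0x80 ≠ 0 := by
    intro k hk hzero
    exact Nat.find_min hex hk ⟨fun j hj => hsome0 j (by omega), hzero⟩
  have hfuel : m0 < 2 * dat.length + 1 := by omega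
  unfold Spec_decode_LEB128 decode_LEB128 decode_LEB128_alt
  rw [pv_loopA_eq dat start m0 start 0 _ (le_refl _) hfuel hsome0 hmid0 hclear0]
  rw [pv_findEnd_eq dat m0 start _ hfuel hsome0 hmid0 hclear0]
  have hH := pv_horner_eq dat start m0 0 (2 * dat.length + 1) (le_refl _) hfuel hsome0
  simp only [hH]
  simp
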